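-- pv_equiv track=rewrite | github.com/woosteelz/AlgorithmPrac | BaekJoon/BOJ1244.py | female
-- ===== SOURCE A (Python) =====
-- def change(a):
--     return 0 if a == 1 else 1
--
-- def female(num, arr):
--     idx1, idx2 = num-1, num+1
--     arr[num] = change(arr[num])
--     while idx1 >= 0 and idx2 < len(arr):
--         if arr[idx1] == arr[idx2]:
--             arr[idx1], arr[idx2] = change(arr[idx1]), change(arr[idx2])
--         else:
--             break
--         idx1 -= 1
--         idx2 += 1
--     return arr
-- ===== SOURCE B (Python) =====
-- def female(num, arr):
--     # Equivalence is about the return value; B mutates only arr[num] in place.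
--     arr[num] = 0 if arr[num] == 1 else 1
--     r = 0
--     while num - r - 1 >= 0 and num + r + 1 < len(arr) and arr[num - r - 1] == arr[num + r + 1]:
--         r += 1
--     return [(0 if x == 1 else 1) if (num - r <= i <= num + r and i != num) else x
--             for i, x in enumerate(arr)]
-- ===== Notes on version B (the rewrite author's own statement) =====
-- stated objective: alternative
-- what changed: A interleaves comparing and toggling mirrored pairs in one destructive while-loop; B first toggles the pivot, measures the matching radius r in a read-only scan, then builds the result in a single enumerate comprehension toggling the contiguous interval [num-r, num+r].
import Mathlib
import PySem

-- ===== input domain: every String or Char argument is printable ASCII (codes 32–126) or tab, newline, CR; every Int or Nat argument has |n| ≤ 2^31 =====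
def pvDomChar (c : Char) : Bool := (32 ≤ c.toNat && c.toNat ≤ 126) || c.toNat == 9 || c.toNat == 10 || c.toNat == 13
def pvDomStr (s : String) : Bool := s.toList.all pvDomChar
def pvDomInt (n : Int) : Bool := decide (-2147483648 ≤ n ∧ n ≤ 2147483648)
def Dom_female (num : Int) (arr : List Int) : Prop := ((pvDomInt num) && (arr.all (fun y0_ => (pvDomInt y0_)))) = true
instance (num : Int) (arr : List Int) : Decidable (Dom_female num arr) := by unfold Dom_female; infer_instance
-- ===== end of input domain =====

-- B replaces A's destructive compare-and-toggle while-loop by a read-only radius scan plus one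
-- enumerate comprehension over the contiguous toggled interval (alternative decomposition; the
-- equivalence proved is about the RETURN value — A mutates arr throughout, B only arr[num]).


-- ===== PORT A =====
def change (a : Int) : Int := if a == 1 then 0 else 1

def femaleLoop (idx1 idx2 : Int) (arr : List Int) : List Int :=
  if idx1 ≥ 0 ∧ idx2 < (arr.length : Int) then
    if PySem.List.pyGetD arr idx1 0 == PySem.List.pyGetD arr idx2 0 then
      femaleLoop (idx1 - 1) (idx2 + 1)
        (PySem.List.pySetD
          (PySem.List.pySetD arr idx1 (change (PySem.List.pyGetD arr idx1 0)))
          idx2 (change (PySem.List.pyGetD arr idx2 0)))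
    else arr
  else arr
termination_by ((arr.length : Int) - idx2).toNat
decreasing_by
  simp only [PySem.List.length_pySetD]
  omega

def female (num : Int) (arr : List Int) : List Int :=
  femaleLoop (num - 1) (num + 1)
    (PySem.List.pySetD arr num (change (PySem.List.pyGetD arr num 0)))

-- ===== PORT B =====
def femaleAltRadius (num : Int) (arr : List Int) (r : Int) : Int :=
  if num - r - 1 ≥ 0 ∧ num + r + 1 < (arr.length : Int) ∧
      PySem.List.pyGetD arr (num - r - 1) 0 == PySem.List.pyGetD arr (num + r + 1) 0 then
    femaleAltRadius num arr (r + 1)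
  else r
termination_by ((arr.length : Int) - r).toNat
decreasing_by omega

def female_alt (num : Int) (arr : List Int) : List Int :=
  let a1 := PySem.List.pySetD arr num (if PySem.List.pyGetD arr num 0 == 1 then 0 else 1)
  let r := femaleAltRadius num a1 0
  (PySem.List.enumerate a1 0).map (fun p =>
    if num - r ≤ p.1 ∧ p.1 ≤ num + r ∧ p.1 ≠ num then (if p.2 == 1 then 0 else 1) else p.2)

-- ===== PRECONDITION & SPEC =====
-- A (and B) raise IndexError on arr[num] when num is out of Python's index range; excluded.
def Pre_female (num : Int) (arr : List Int) : Prop := PySem.Raise.InRange arr.length num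
instance (num : Int) (arr : List Int) : Decidable (Pre_female num arr) := by
  unfold Pre_female; infer_instance

def pvWitness_female : Int × List Int := (2, [1, 0, 1, 0, 1])

def Spec_female (num : Int) (arr : List Int) (out : List Int) : Prop := out = female_alt num arr
instance (num : Int) (arr : List Int) (out : List Int) : Decidable (Spec_female num arr out) := by
  unfold Spec_female; infer_instance

-- ===== CLAIM (what is proved, stated in full; the proofs are below) =====
def Claim_equal_female : Prop := ∀ (num : Int) (arr : List Int), Dom_female num arr → Pre_female num arr → Spec_female num arr (female num arr)

-- ===== LEMMAS AND PROOFS =====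

/-- B's comprehension, as a function of the radius `k`. -/
def toggledZone (num k : Int) (xs : List Int) : List Int :=
  (PySem.List.enumerate xs 0).map (fun p =>
    if num - k ≤ p.1 ∧ p.1 ≤ num + k ∧ p.1 ≠ num then (if p.2 == 1 then 0 else 1) else p.2)

theorem length_toggledZone (num k : Int) (xs : List Int) :
    (toggledZone num k xs).length = xs.length := by
  simp [toggledZone, PySem.List.length_enumerate]

theorem getElem_toggledZone (num k : Int) (xs : List Int) (i : Nat) (hi : i < xs.length) :
    (toggledZone num k xs)[i]'(by simpa [length_toggledZone] using hi) =
      if num - k ≤ (i : Int) ∧ (i : Int) ≤ num + k ∧ (i : Int) ≠ num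
      then (if xs[i] == 1 then 0 else 1) else xs[i] := by
  simp [toggledZone, PySem.List.getElem_enumerate]

theorem toggledZone_zero (num : Int) (xs : List Int) : toggledZone num 0 xs = xs := by
  apply List.ext_getElem (by simp [length_toggledZone])
  intro i h1 h2
  rw [getElem_toggledZone num 0 xs i h2]
  have h : ¬ (num - 0 ≤ (i : Int) ∧ (i : Int) ≤ num + 0 ∧ (i : Int) ≠ num) := by omega
  rw [if_neg h]

theorem pyGetD_toggledZone_out (num k j : Int) (xs : List Int)
    (h0 : 0 ≤ j) (hn : j < (xs.length : Int)) (hout : j < num - k ∨ num + k < j) :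
    PySem.List.pyGetD (toggledZone num k xs) j 0 = PySem.List.pyGetD xs j 0 := by
  rw [PySem.List.pyGetD_eq_getElem _ 0 h0 (by simpa [length_toggledZone] using hn),
      PySem.List.pyGetD_eq_getElem _ 0 h0 hn]
  rw [getElem_toggledZone num k xs j.toNat (by omega),
      if_neg (show ¬ (num - k ≤ ((j.toNat : Nat) : Int) ∧ ((j.toNat : Nat) : Int) ≤ num + k ∧
        ((j.toNat : Nat) : Int) ≠ num) by omega)]

theorem setPair_toggledZone (num k : Int) (xs : List Int) (hk : 0 ≤ k)
    (h1 : 0 ≤ num - k - 1) (h2 : num + k + 1 < (xs.length : Int)) :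
    PySem.List.pySetD
      (PySem.List.pySetD (toggledZone num k xs) (num - k - 1)
        (change (PySem.List.pyGetD xs (num - k - 1) 0)))
      (num + k + 1)
      (change (PySem.List.pyGetD xs (num + k + 1) 0)) =
    toggledZone num (k + 1) xs := by
  rw [PySem.List.pySetD_of_nonneg _ _ h1,
      PySem.List.pySetD_of_nonneg _ _ (by omega : (0:Int) ≤ num + k + 1),
      PySem.List.pyGetD_eq_getElem xs 0 h1 (by omega),
      PySem.List.pyGetD_eq_getElem xs 0 (by omega : (0:Int) ≤ num + k + 1) (by omega)]
  apply List.ext_getElem (by simp [length_toggledZone])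
  intro i hL hR
  have hi : i < xs.length := by simpa [length_toggledZone] using hR
  rw [List.getElem_set, List.getElem_set, getElem_toggledZone num (k+1) xs i hi]
  by_cases hB : (num + k + 1).toNat = i
  · rw [if_pos hB,
        if_pos (show num - (k+1) ≤ (i:Int) ∧ (i:Int) ≤ num + (k+1) ∧ (i:Int) ≠ num by omega)]
    simp [change, hB.symm]
  · rw [if_neg hB]
    by_cases hA : (num - k - 1).toNat = i
    · rw [if_pos hA,
          if_pos (show num - (k+1) ≤ (i:Int) ∧ (i:Int) ≤ num + (k+1) ∧ (i:Int) ≠ num by omega)]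
      simp [change, hA.symm]
    · rw [if_neg hA, getElem_toggledZone num k xs i hi]
      by_cases hin : num - k ≤ (i : Int) ∧ (i : Int) ≤ num + k ∧ (i : Int) ≠ num
      · rw [if_pos hin,
            if_pos (show num - (k+1) ≤ (i:Int) ∧ (i:Int) ≤ num + (k+1) ∧ (i:Int) ≠ num by omega)]
      · rw [if_neg hin,
            if_neg (show ¬ (num - (k+1) ≤ (i:Int) ∧ (i:Int) ≤ num + (k+1) ∧ (i:Int) ≠ num) by omega)]

/-- The invariant: A's loop, started at distance `k+1` from the pivot on the list with the first
`k` pairs already toggled, ends at the list with the first `radius` pairs toggled. -/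
theorem femaleLoop_eq_toggled (num : Int) (a1 : List Int) :
    ∀ (k : Int), 0 ≤ k →
      femaleLoop (num - k - 1) (num + k + 1) (toggledZone num k a1) =
        toggledZone num (femaleAltRadius num a1 k) a1 := by
  intro k hk
  have hmeas : ∀ k : Int, ((a1.length : Int) - k).toNat = ((a1.length : Int) - k).toNat := fun _ => rfl
  induction hfuel : ((a1.length : Int) - k).toNat using Nat.strong_induction_on generalizing k with
  | _ n ih =>
    rw [femaleLoop, femaleAltRadius]
    by_cases hC : num - k - 1 ≥ 0 ∧ num + k + 1 < (a1.length : Int)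
    · have hC' : num - k - 1 ≥ 0 ∧ num + k + 1 < ((toggledZone num k a1).length : Int) := by
        simpa [length_toggledZone] using hC
      rw [if_pos hC']
      rw [pyGetD_toggledZone_out num k (num - k - 1) a1 hC.1 (by omega) (by omega),
          pyGetD_toggledZone_out num k (num + k + 1) a1 (by omega) (by omega) (by omega)]
      by_cases hEq : PySem.List.pyGetD a1 (num - k - 1) 0 == PySem.List.pyGetD a1 (num + k + 1) 0
      · rw [if_pos hEq, if_pos ⟨hC.1, hC.2, hEq⟩]
        rw [setPair_toggledZone num k a1 hk hC.1 hC.2]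
        have hrec : num - k - 1 - 1 = num - (k+1) - 1 := by ring
        have hrec2 : num + k + 1 + 1 = num + (k+1) + 1 := by ring
        rw [hrec, hrec2]
        exact ih (((a1.length : Int) - (k+1)).toNat) (by omega) (k+1) (by omega) rfl
      · rw [if_neg hEq, if_neg (by simp [hEq])]
    · rw [if_neg (by simpa [length_toggledZone] using hC), if_neg (by omega)]

-- ===== VERDICT (by name: the statement is the Claim_ definition above) =====
theorem female_spec : Claim_equal_female := by
  intro num arr _ _
  unfold Spec_female female female_alt
  have e : (if PySem.List.pyGetD arr num 0 == 1 then (0:Int) else 1)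
      = change (PySem.List.pyGetD arr num 0) := rfl
  rw [e]
  have h := femaleLoop_eq_toggled num
      (PySem.List.pySetD arr num (change (PySem.List.pyGetD arr num 0))) 0 le_rfl
  rw [toggledZone_zero] at h
  simp only [sub_zero, add_zero] at h
  simpa [toggledZone] using h
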